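-- pv_equiv track=rewrite | github.com/HeathenUK/8bit-cpu | MK1_CPU/code/hw_regression.py | dedup_consecutive_with_ts
-- ===== SOURCE A (Python) =====
-- def dedup_consecutive_with_ts(vals, ts):
--     """Like dedup_consecutive but also returns the ts (MK1 cycle count)
--     of the FIRST sample in each run. Used for timing-based assertions."""
--     out_v = []
--     out_t = []
--     for i, v in enumerate(vals):
--         if not out_v or out_v[-1] != v:
--             out_v.append(v)
--             out_t.append(ts[i] if i < len(ts) else None)
--     return out_v, out_t
-- ===== SOURCE B (Python) =====
-- def dedup_consecutive_with_ts(vals, ts):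
--     """Run-skipping rewrite: find each maximal run of equal consecutive
--     values and record its first value and first timestamp."""
--     out_v = []
--     out_t = []
--     n = len(vals)
--     i = 0
--     while i < n:
--         v = vals[i]
--         out_v.append(v)
--         out_t.append(ts[i] if i < len(ts) else None)
--         i += 1
--         while i < n and vals[i] == v:
--             i += 1
--     return out_v, out_t
-- ===== Notes on version B (the rewrite author's own statement) =====
-- stated objective: alternative
-- what changed: Replaces the compare-with-last-appended-element loop by run detection: an outer loop takes a run's first value and timestamp, an inner loop skips the rest of the run, so no peeking at the output list.
import Mathlib
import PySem

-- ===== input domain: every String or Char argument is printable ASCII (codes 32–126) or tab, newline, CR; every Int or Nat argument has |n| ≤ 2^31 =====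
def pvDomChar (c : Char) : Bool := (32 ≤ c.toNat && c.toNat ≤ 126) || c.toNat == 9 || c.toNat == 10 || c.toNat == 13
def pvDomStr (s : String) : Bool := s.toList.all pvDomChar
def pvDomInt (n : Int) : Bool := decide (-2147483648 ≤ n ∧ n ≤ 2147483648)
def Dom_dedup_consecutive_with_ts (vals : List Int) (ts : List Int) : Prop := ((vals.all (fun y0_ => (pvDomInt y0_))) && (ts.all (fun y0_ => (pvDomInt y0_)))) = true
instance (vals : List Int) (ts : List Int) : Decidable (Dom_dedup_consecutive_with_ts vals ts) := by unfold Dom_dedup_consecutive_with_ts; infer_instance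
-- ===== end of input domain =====

-- B replaces A's compare-with-last-output loop by run detection (skip each maximal run); objective: alternative, same cost.

-- ===== PORT A =====
-- one loop iteration: 'if not out_v or out_v[-1] != v: append v; append ts[i] if i < len(ts) else None'
def pvAStep (ts : List Int) (acc : List Int × List (Option Int)) (iv : Int × Int) :
    List Int × List (Option Int) :=
  match PySem.List.pyGet? acc.1 (-1) with
  | none => (acc.1 ++ [iv.2], acc.2 ++ [PySem.List.pyGet? ts iv.1])
  | some w =>
      if w ≠ iv.2 then (acc.1 ++ [iv.2], acc.2 ++ [PySem.List.pyGet? ts iv.1]) else acc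

def dedup_consecutive_with_ts (vals : List Int) (ts : List Int) : List Int × List (Option Int) :=
  (PySem.List.enumerate vals).foldl (pvAStep ts) ([], [])

-- ===== PORT B =====
-- B's outer loop body: take the run's first value/ts, inner loop skips the run (dropWhile)
def pvBGo (ts : List Int) : List (Int × Int) → List Int × List (Option Int)
  | [] => ([], [])
  | (i, v) :: rest =>
      let r := pvBGo ts (rest.dropWhile (fun p => p.2 == v))
      (v :: r.1, PySem.List.pyGet? ts i :: r.2)
  termination_by l => l.length
  decreasing_by
    simpa using Nat.lt_succ_of_le (List.length_dropWhile_le _ _)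

def dedup_consecutive_with_ts_alt (vals : List Int) (ts : List Int) : List Int × List (Option Int) :=
  pvBGo ts (PySem.List.enumerate vals)

-- ===== PRECONDITION & SPEC =====
def Spec_dedup_consecutive_with_ts (vals : List Int) (ts : List Int) (out : List Int × List (Option Int)) : Prop := out = dedup_consecutive_with_ts_alt vals ts
instance (vals : List Int) (ts : List Int) (out : List Int × List (Option Int)) : Decidable (Spec_dedup_consecutive_with_ts vals ts out) := by unfold Spec_dedup_consecutive_with_ts; infer_instance

-- ===== CLAIM (what is proved, stated in full; the proofs are below) =====
def Claim_equal_dedup_consecutive_with_ts : Prop := ∀ (vals : List Int) (ts : List Int), Dom_dedup_consecutive_with_ts vals ts → Spec_dedup_consecutive_with_ts vals ts (dedup_consecutive_with_ts vals ts)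

-- ===== LEMMAS AND PROOFS =====

-- while the last output value is v, A's step ignores elements equal to v
theorem pvA_skip (ts : List Int) (l : List (Int × Int)) :
    ∀ (ov : List Int) (ot : List (Option Int)) (v : Int), ov.getLast? = some v →
    l.foldl (pvAStep ts) (ov, ot) = (l.dropWhile (fun p => p.2 == v)).foldl (pvAStep ts) (ov, ot) := by
  induction l with
  | nil => intro ov ot v h; rfl
  | cons p rest ih =>
      intro ov ot v h
      by_cases hv : p.2 = v
      · have hstep : pvAStep ts (ov, ot) p = (ov, ot) := by
          simp [pvAStep, PySem.List.pyGet?_neg_one, h, hv]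
        simp only [List.foldl_cons, List.dropWhile_cons, hv, BEq.rfl, hstep]
        exact ih ov ot v h
      · simp [List.dropWhile_cons, hv]

theorem pvMain (ts : List Int) :
    ∀ (n : ℕ) (l : List (Int × Int)), l.length ≤ n →
    ∀ (ov : List Int) (ot : List (Option Int)) (v : Int), ov.getLast? = some v →
    l.foldl (pvAStep ts) (ov, ot) =
      (ov ++ (pvBGo ts (l.dropWhile (fun p => p.2 == v))).1,
       ot ++ (pvBGo ts (l.dropWhile (fun p => p.2 == v))).2) := by
  intro n
  induction n with
  | zero =>
      intro l hl ov ot v h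
      have : l = [] := List.length_eq_zero_iff.mp (Nat.le_zero.mp hl)
      subst this; simp [pvBGo]
  | succ n ih =>
      intro l hl ov ot v h
      rw [pvA_skip ts l ov ot v h]
      generalize hd : l.dropWhile (fun p => p.2 == v) = l'
      match l', hd with
      | [], _ => simp [pvBGo]
      | (i, w) :: rest, hd =>
          have hwv : ¬ (w == v) = true := by
            have := List.head?_dropWhile_not (fun p => p.2 == v) l
            rw [hd] at this; simpa using this
          have hstep : pvAStep ts (ov, ot) (i, w) =
              (ov ++ [w], ot ++ [PySem.List.pyGet? ts i]) := by
            have hne : w ≠ v := by simpa using hwv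
            simp [pvAStep, PySem.List.pyGet?_neg_one, h, (Ne.symm hne)]
          have hlen : rest.length ≤ n := by
            have : ((i, w) :: rest).length ≤ l.length := by
              rw [← hd]; exact List.length_dropWhile_le _ _
            simp only [List.length_cons] at this
            omega
          have hov : (ov ++ [w]).getLast? = some w := by simp
          rw [List.foldl_cons, hstep, ih rest hlen (ov ++ [w]) (ot ++ [PySem.List.pyGet? ts i]) w hov]
          simp [pvBGo]

-- ===== VERDICT (by name: the statement is the Claim_ definition above) =====
theorem dedup_consecutive_with_ts_spec : Claim_equal_dedup_consecutive_with_ts := by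
  intro vals ts _
  unfold Spec_dedup_consecutive_with_ts dedup_consecutive_with_ts dedup_consecutive_with_ts_alt
  cases hv : PySem.List.enumerate vals with
  | nil => simp [pvBGo]
  | cons p rest =>
      obtain ⟨i, v⟩ := p
      have hstep : pvAStep ts ([], []) (i, v) = ([v], [PySem.List.pyGet? ts i]) := by
        simp [pvAStep, PySem.List.pyGet?, PySem.List.pyIdx?]
      rw [List.foldl_cons, hstep,
        pvMain ts rest.length rest le_rfl [v] [PySem.List.pyGet? ts i] v (by simp)]
      simp [pvBGo]
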